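-- pv_equiv track=rewrite | github.com/TI-for-Coding/PS | DH/프로그래머스_코딩테스트 고득점 Kit/MockTest(P42840,Case1).py | solution
-- ===== SOURCE A (Python) =====
-- def solution(answers):
--     score = [[0, 1], [0, 2], [0, 3]]
--     answer = []
--
--     student1 = [1, 2, 3, 4, 5]
--     student2 = [2, 1, 2, 3, 2, 4, 2, 5]
--     student3 = [3, 3, 1, 1, 2, 2, 4, 4, 5, 5]
--
--     idx = 0
--     for a in answers:                     # 정답과 각 학생의 답안을 비교
--
--         if a == student1[idx % 5]:
--             score[0][0] = score[0][0] + 1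
--         if a == student2[idx % 8]:
--             score[1][0] = score[1][0] + 1
--         if a == student3[idx % 10]:
--             score[2][0] = score[2][0] + 1
--
--         idx = idx + 1
--
--     max = -1
--     for s in score :                      # 고득점 답안자를 answer 리스트에 저장
--         if s[0] > max :
--             max = s[0]
--             answer.clear()
--         if s[0] == max :
--             answer.append(s[1])
--
--     return answer
-- ===== SOURCE B (Python) =====
-- def solution(answers):
--     # Bucket-count: one histogram keyed by (position mod 40, answer value);
--     # 40 = lcm(5, 8, 10) is the common period of the three guess patterns,
--     # so each student's score is a fixed 40-term table-lookup sum.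
--     hist = {}
--     for i, a in enumerate(answers):
--         key = (i % 40, a)
--         hist[key] = hist.get(key, 0) + 1
--     patterns = [[1, 2, 3, 4, 5],
--                 [2, 1, 2, 3, 2, 4, 2, 5],
--                 [3, 3, 1, 1, 2, 2, 4, 4, 5, 5]]
--     scores = [sum(hist.get((r, p[r % len(p)]), 0) for r in range(40))
--               for p in patterns]
--     best = max(scores)
--     return [i + 1 for i, s in enumerate(scores) if s == best]
-- ===== Notes on version B (the rewrite author's own statement) =====
-- stated objective: alternative
-- what changed: Instead of comparing each answer against the three patterns, B builds one histogram keyed by (index mod 40, value) in a single pass (40 = lcm of the pattern periods 5,8,10), then computes each student's score as a fixed 40-term table-lookup sum over the histogram, followed by max-then-filter; A keeps three running scores with interleaved comparisons and a running-max/clear/append pass.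
import Mathlib
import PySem

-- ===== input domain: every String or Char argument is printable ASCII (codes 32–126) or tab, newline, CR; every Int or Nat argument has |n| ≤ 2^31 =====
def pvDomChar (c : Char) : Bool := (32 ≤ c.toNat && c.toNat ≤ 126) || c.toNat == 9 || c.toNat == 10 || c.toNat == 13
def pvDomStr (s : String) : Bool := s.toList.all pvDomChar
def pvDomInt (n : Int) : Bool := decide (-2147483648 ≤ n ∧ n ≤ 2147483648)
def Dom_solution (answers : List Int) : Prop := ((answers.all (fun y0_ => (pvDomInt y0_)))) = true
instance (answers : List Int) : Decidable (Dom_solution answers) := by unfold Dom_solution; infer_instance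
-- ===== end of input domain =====

-- B replaces A's per-answer comparison against the three patterns by a single histogram
-- keyed by (index mod 40, value) — 40 = lcm of the pattern periods — plus a fixed 40-term
-- lookup sum per student and a max-then-filter pass (objective: alternative).

-- ===== PORT A =====
def pvStudent1 : List Int := [1, 2, 3, 4, 5]
def pvStudent2 : List Int := [2, 1, 2, 3, 2, 4, 2, 5]
def pvStudent3 : List Int := [3, 3, 1, 1, 2, 2, 4, 4, 5, 5]

-- the single interleaved scoring loop; indices idx % 5/8/10 are always in range,
-- so getD is exact for Python's student[idx % k]
def pvLoopA : List Int → Nat → Int × Int × Int → Int × Int × Int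
  | [], _, s => s
  | a :: rest, idx, (s1, s2, s3) =>
    let s1 := if a = pvStudent1.getD (idx % 5) 0 then s1 + 1 else s1
    let s2 := if a = pvStudent2.getD (idx % 8) 0 then s2 + 1 else s2
    let s3 := if a = pvStudent3.getD (idx % 10) 0 then s3 + 1 else s3
    pvLoopA rest (idx + 1) (s1, s2, s3)

-- the running-max / clear / append loop over score = [[s1,1],[s2,2],[s3,3]]
def pvLoop2 : List (Int × Int) → Int → List Int → List Int
  | [], _, ans => ans
  | (sc, sid) :: rest, mx, ans =>
    let p := if sc > mx then (sc, ([] : List Int)) else (mx, ans)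
    let ans := if sc = p.1 then p.2 ++ [sid] else p.2
    pvLoop2 rest p.1 ans

def solution (answers : List Int) : List Int :=
  let s := pvLoopA answers 0 (0, 0, 0)
  pvLoop2 [(s.1, 1), (s.2.1, 2), (s.2.2, 3)] (-1) []

-- ===== PORT B =====
-- hist[key] = hist.get(key, 0) + 1 over enumerate(answers), key = (i % 40, a);
-- p[r % len(p)] with 0 ≤ r < 40 is in range, so getD of the toNat index is exact
def solution_alt (answers : List Int) : List Int :=
  let hist := (PySem.List.enumerate answers).foldl
      (fun d ia =>
        let k := (PySem.Int.mod ia.1 40, ia.2)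
        d.insert k (d.getD k 0 + 1))
      (PySem.Dict.empty : PySem.Dict (Int × Int) Int)
  let patterns : List (List Int) :=
    [[1, 2, 3, 4, 5], [2, 1, 2, 3, 2, 4, 2, 5], [3, 3, 1, 1, 2, 2, 4, 4, 5, 5]]
  let scores := patterns.map (fun p =>
      (PySem.List.pyRange 0 40 1).foldl
        (fun s r => s + hist.getD (r, p.getD ((PySem.Int.mod r (p.length : Int)).toNat) 0) 0) 0)
  let m := (PySem.List.max? scores (fun x => x)).getD 0   -- scores has 3 elements, never none
  (PySem.List.enumerate scores).filterMap
    (fun is => if is.2 = m then some (is.1 + 1) else none)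

-- ===== PRECONDITION & SPEC =====
def Spec_solution (answers : List Int) (out : List Int) : Prop := out = solution_alt answers
instance (answers : List Int) (out : List Int) : Decidable (Spec_solution answers out) := by unfold Spec_solution; infer_instance

-- ===== CLAIM (what is proved, stated in full; the proofs are below) =====
def Claim_equal_solution : Prop := ∀ (answers : List Int), Dom_solution answers → Spec_solution answers (solution answers)

-- ===== LEMMAS AND PROOFS =====

-- direct per-pattern count, A's characterisation
def pvCnt (p : List Int) : List Int → Nat → Int
  | [], _ => 0
  | a :: rest, i => (if a = p.getD (i % p.length) 0 then 1 else 0) + pvCnt p rest (i + 1)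

theorem pvLoopA_eq (answers : List Int) : ∀ (idx : Nat) (s1 s2 s3 : Int),
    pvLoopA answers idx (s1, s2, s3) =
      (s1 + pvCnt pvStudent1 answers idx,
       s2 + pvCnt pvStudent2 answers idx,
       s3 + pvCnt pvStudent3 answers idx) := by
  induction answers with
  | nil => intro idx s1 s2 s3; simp [pvLoopA, pvCnt]
  | cons a rest ih =>
    intro idx s1 s2 s3
    simp only [pvLoopA, pvCnt, ih, pvStudent1, pvStudent2, pvStudent3, List.length]
    split_ifs <;> simp <;> first | trivial | omega

theorem pvCnt_nonneg (p : List Int) (xs : List Int) : ∀ i, 0 ≤ pvCnt p xs i := by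
  induction xs with
  | nil => intro i; simp [pvCnt]
  | cons a rest ih =>
    intro i
    have := ih (i + 1)
    simp only [pvCnt]
    split_ifs <;> omega

theorem pvLoop2_nil (mx : Int) (ans : List Int) : pvLoop2 [] mx ans = ans := rfl

theorem pvLoop2_gt (sc mx sid : Int) (ans : List Int) (rest : List (Int × Int))
    (h : sc > mx) : pvLoop2 ((sc, sid) :: rest) mx ans = pvLoop2 rest sc [sid] := by
  simp [pvLoop2, h]

theorem pvLoop2_eqc (sc mx sid : Int) (ans : List Int) (rest : List (Int × Int))
    (h : sc = mx) : pvLoop2 ((sc, sid) :: rest) mx ans = pvLoop2 rest mx (ans ++ [sid]) := by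
  simp [pvLoop2, h]

theorem pvLoop2_lt (sc mx sid : Int) (ans : List Int) (rest : List (Int × Int))
    (h : sc < mx) : pvLoop2 ((sc, sid) :: rest) mx ans = pvLoop2 rest mx ans := by
  simp [pvLoop2, not_lt.mpr h.le, h.ne]

theorem pvPhase2 (c1 c2 c3 : Int) (h1 : 0 ≤ c1) :
    pvLoop2 [(c1, 1), (c2, 2), (c3, 3)] (-1) [] =
      (PySem.List.enumerate [c1, c2, c3]).filterMap
        (fun is => if is.2 = ((PySem.List.max? [c1, c2, c3] (fun x => x)).getD 0)
                   then some (is.1 + 1) else none) := by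
  have hm : (PySem.List.max? [c1, c2, c3] (fun x => x)).getD 0 = max (max c1 c2) c3 := by
    simp [PySem.List.max?_id_cons]
  rw [hm]
  have hR : ∀ M : Int,
      (PySem.List.enumerate [c1, c2, c3]).filterMap
          (fun is => if is.2 = M then some (is.1 + 1) else none) =
        (if c1 = M then [(1 : Int)] else []) ++ (if c2 = M then [2] else []) ++
          (if c3 = M then [3] else []) := by
    intro M
    simp only [PySem.List.enumerate, List.filterMap]
    split_ifs <;> norm_num
  rw [hR]
  rw [pvLoop2_gt _ _ _ _ _ (by omega)]
  rcases lt_trichotomy c2 c1 with h2 | h2 | h2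
  · rw [pvLoop2_lt _ _ _ _ _ h2]
    rcases lt_trichotomy c3 c1 with h3 | h3 | h3
    · rw [pvLoop2_lt _ _ _ _ _ h3, pvLoop2_nil]
      have hM : max (max c1 c2) c3 = c1 := by omega
      rw [hM, if_pos rfl, if_neg (by omega), if_neg (by omega)]; try simp
    · rw [pvLoop2_eqc _ _ _ _ _ h3, pvLoop2_nil]
      have hM : max (max c1 c2) c3 = c1 := by omega
      rw [hM, if_pos rfl, if_neg (by omega), if_pos (by omega)]; try simp
    · rw [pvLoop2_gt _ _ _ _ _ h3, pvLoop2_nil]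
      have hM : max (max c1 c2) c3 = c3 := by omega
      rw [hM, if_neg (by omega), if_neg (by omega), if_pos rfl]; try simp
  · rw [pvLoop2_eqc _ _ _ _ _ h2]
    rcases lt_trichotomy c3 c1 with h3 | h3 | h3
    · rw [pvLoop2_lt _ _ _ _ _ h3, pvLoop2_nil]
      have hM : max (max c1 c2) c3 = c1 := by omega
      rw [hM, if_pos rfl, if_pos (by omega), if_neg (by omega)]; try simp
    · rw [pvLoop2_eqc _ _ _ _ _ h3, pvLoop2_nil]
      have hM : max (max c1 c2) c3 = c1 := by omega
      rw [hM, if_pos rfl, if_pos (by omega), if_pos (by omega)]; try simp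
    · rw [pvLoop2_gt _ _ _ _ _ h3, pvLoop2_nil]
      have hM : max (max c1 c2) c3 = c3 := by omega
      rw [hM, if_neg (by omega), if_neg (by omega), if_pos rfl]; try simp
  · rw [pvLoop2_gt _ _ _ _ _ h2]
    rcases lt_trichotomy c3 c2 with h3 | h3 | h3
    · rw [pvLoop2_lt _ _ _ _ _ h3, pvLoop2_nil]
      have hM : max (max c1 c2) c3 = c2 := by omega
      rw [hM, if_neg (by omega), if_pos rfl, if_neg (by omega)]; try simp
    · rw [pvLoop2_eqc _ _ _ _ _ h3, pvLoop2_nil]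
      have hM : max (max c1 c2) c3 = c2 := by omega
      rw [hM, if_neg (by omega), if_pos rfl, if_pos (by omega)]; try simp
    · rw [pvLoop2_gt _ _ _ _ _ h3, pvLoop2_nil]
      have hM : max (max c1 c2) c3 = c3 := by omega
      rw [hM, if_neg (by omega), if_neg (by omega), if_pos rfl]; try simp

-- B-side bridge: the histogram lookup at a fixed key counts matching (index mod 40, value) pairs
theorem pvHist_getD (answers : List Int) (k : Int × Int) :
    ((PySem.List.enumerate answers).foldl
        (fun d ia =>
          let kk := (PySem.Int.mod ia.1 40, ia.2)
          d.insert kk (d.getD kk 0 + 1))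
        (PySem.Dict.empty : PySem.Dict (Int × Int) Int)).getD k 0 =
      ((PySem.List.enumerate answers).map
        (fun ia => (PySem.Int.mod ia.1 40, ia.2))).count k := by
  rw [show (fun (d : PySem.Dict (Int × Int) Int) (ia : Int × Int) =>
        let kk := (PySem.Int.mod ia.1 40, ia.2)
        d.insert kk (d.getD kk 0 + 1)) =
      (fun d ia => d.insert ((PySem.Int.mod ia.1 40, ia.2))
        (d.getD ((PySem.Int.mod ia.1 40, ia.2)) 0 + 1)) from rfl,
      ← List.foldl_map (f := fun ia : Int × Int => (PySem.Int.mod ia.1 40, ia.2))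
        (g := fun (d : PySem.Dict (Int × Int) Int) kk => d.insert kk (d.getD kk 0 + 1)),
      PySem.Dict.foldl_insert_getD_add_one_eq_counter, PySem.Dict.getD_counter]

-- the pattern value a position r of the 40-cycle looks up
def pvKey (p : List Int) (r : Int) : Int := p.getD ((PySem.Int.mod r (p.length : Int)).toNat) 0

-- a 0/1 indicator summed over a list containing m exactly once collapses to the m term
theorem pvIndSum (m a : Int) (key : Int → Int) :
    ∀ l : List Int, l.count m = 1 →
    (l.map (fun r => if ((m, a) : Int × Int) == (r, key r) then (1 : Int) else 0)).sum
      = if a = key m then 1 else 0 := by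
  intro l
  induction l with
  | nil => simp
  | cons r t ih =>
    intro h
    rw [List.count_cons] at h
    by_cases hr : r = m
    · subst hr
      have ht : t.count r = 0 := by simpa using h
      have hnm : r ∉ t := List.count_eq_zero.mp ht
      have hz : (t.map (fun x => if ((r, a) : Int × Int) == (x, key x) then (1 : Int) else 0)).sum = 0 := by
        apply List.sum_eq_zero
        intro y hy
        rcases List.mem_map.mp hy with ⟨x, hx, hxy⟩
        have hxr : x ≠ r := fun hh => hnm (hh ▸ hx)
        rw [← hxy, if_neg]
        intro hc
        have hc' : ((r, a) : Int × Int) = (x, key x) := by simpa using hc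
        exact hxr (congrArg Prod.fst hc').symm
      rw [List.map_cons, List.sum_cons, hz, add_zero]
      by_cases ha : a = key r <;> simp [ha]
    · have h' : t.count m = 1 := by simpa [hr] using h
      have hhead : ¬ ((((m, a) : Int × Int) == (r, key r)) = true) := by
        intro hc
        have hc' : ((m, a) : Int × Int) = (r, key r) := by simpa using hc
        exact hr (congrArg Prod.fst hc').symm
      rw [List.map_cons, List.sum_cons, if_neg hhead, zero_add]
      exact ih h'

-- the per-residue counts summed over the 40-cycle give the direct per-pattern count
theorem pvMain (p : List Int) (hp : p.length ∣ 40) (answers : List Int) : ∀ s : Nat,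
    ((PySem.List.pyRange 0 40 1).map (fun r =>
        ((((PySem.List.enumerate answers (s : Int)).map
            (fun ia => (PySem.Int.mod ia.1 40, ia.2))).count (r, pvKey p r) : Nat) : Int))).sum
      = pvCnt p answers s := by
  induction answers with
  | nil => intro s; simp [pvCnt, PySem.List.enumerate_nil]
  | cons a rest ih =>
    intro s
    have hmod : PySem.Int.mod (s : Int) 40 = ((s % 40 : Nat) : Int) := by
      exact_mod_cast PySem.Int.mod_natCast s 40
    have hkey : pvKey p (PySem.Int.mod (s : Int) 40) = p.getD (s % p.length) 0 := by
      have h2 : PySem.Int.mod ((s % 40 : Nat) : Int) ((p.length : Nat) : Int)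
          = (((s % 40) % p.length : Nat) : Int) := PySem.Int.mod_natCast _ _
      unfold pvKey
      rw [hmod, h2, Int.toNat_natCast, Nat.mod_mod_of_dvd s hp]
    have hcast : ((s : Int) + 1) = (((s + 1 : Nat)) : Int) := by push_cast; ring
    calc ((PySem.List.pyRange 0 40 1).map (fun r =>
            ((((PySem.List.enumerate (a :: rest) (s : Int)).map
                (fun ia => (PySem.Int.mod ia.1 40, ia.2))).count (r, pvKey p r) : Nat) : Int))).sum
        = ((PySem.List.pyRange 0 40 1).map (fun r =>
            ((((PySem.List.enumerate rest ((s : Int) + 1)).map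
                (fun ia => (PySem.Int.mod ia.1 40, ia.2))).count (r, pvKey p r) : Nat) : Int)
            + (if ((PySem.Int.mod (s : Int) 40, a) : Int × Int) == (r, pvKey p r) then (1 : Int) else 0))).sum := by
          apply congrArg
          apply List.map_congr_left
          intro r _
          rw [PySem.List.enumerate_cons, List.map_cons, List.count_cons]
          push_cast
          split <;> simp
      _ = ((PySem.List.pyRange 0 40 1).map (fun r =>
            ((((PySem.List.enumerate rest ((s : Int) + 1)).map
                (fun ia => (PySem.Int.mod ia.1 40, ia.2))).count (r, pvKey p r) : Nat) : Int))).sum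
          + ((PySem.List.pyRange 0 40 1).map (fun r =>
            (if ((PySem.Int.mod (s : Int) 40, a) : Int × Int) == (r, pvKey p r) then (1 : Int) else 0))).sum := by
          rw [PySem.List.sum_map_add_int]
      _ = pvCnt p rest (s + 1) + (if a = p.getD (s % p.length) 0 then 1 else 0) := by
          rw [pvIndSum _ _ _ _ (List.count_eq_one_of_mem (PySem.List.nodup_pyRange_one 0 40)
                (PySem.List.mem_pyRange_one.mpr
                  ⟨PySem.Int.mod_nonneg _ (by omega), PySem.Int.mod_lt _ (by omega)⟩)),
              hkey]
          rw [hcast, ih (s + 1)]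
      _ = pvCnt p (a :: rest) s := by
          simp only [pvCnt]; omega

-- the 40-term lookup sum equals the direct per-pattern count
theorem pvScore_eq (p : List Int) (hp : p.length ∣ 40) (answers : List Int) :
    (PySem.List.pyRange 0 40 1).foldl
        (fun s r => s + (((PySem.List.enumerate answers).map
            (fun ia => (PySem.Int.mod ia.1 40, ia.2))).count
              (r, p.getD ((PySem.Int.mod r (p.length : Int)).toNat) 0) : Int)) 0 =
      pvCnt p answers 0 := by
  have h := pvMain p hp answers 0
  rw [PySem.List.foldl_add]
  simpa [pvKey] using h

-- ===== VERDICT (by name: the statement is the Claim_ definition above) =====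
theorem solution_spec : Claim_equal_solution := by
  intro answers _
  unfold Spec_solution solution solution_alt
  rw [pvLoopA_eq answers 0 0 0 0]
  simp only [zero_add, pvStudent1, pvStudent2, pvStudent3, List.map_cons, List.map_nil,
    pvHist_getD]
  rw [pvScore_eq [1, 2, 3, 4, 5] (by decide) answers,
      pvScore_eq [2, 1, 2, 3, 2, 4, 2, 5] (by decide) answers,
      pvScore_eq [3, 3, 1, 1, 2, 2, 4, 4, 5, 5] (by decide) answers]
  exact pvPhase2 _ _ _ (pvCnt_nonneg _ _ 0)
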